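-- pv_equiv track=rewrite | github.com/arnoldaz/advent-of-code | 2023/09.py | get_sequence_tree
-- ===== SOURCE A (Python) =====
-- def get_sequence_tree(history: list[int]) -> list[list[int]]:
--     sequences: list[list[int]] = [history]
--     current_sequence = history
--     while any(x != 0 for x in current_sequence):
--         sequence = [current_sequence[i] - current_sequence[i-1] for i in range(1, len(current_sequence))]
--         sequences.append(sequence)
--         current_sequence = sequence
--
--     return sequences
-- ===== SOURCE B (Python) =====
-- def get_sequence_tree(history: list[int]) -> list[list[int]]:
--     if all(x == 0 for x in history):
--         return [history]
--     diffs = [history[i] - history[i-1] for i in range(1, len(history))]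
--     return [history] + get_sequence_tree(diffs)
-- ===== Notes on version B (the rewrite author's own statement) =====
-- stated objective: simpler
-- what changed: Replaced the while loop with an explicit sequences accumulator by a top-down recursion on the difference structure: base case returns [history] when all entries are zero, otherwise prepend history to the tree of its difference sequence.
import Mathlib
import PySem

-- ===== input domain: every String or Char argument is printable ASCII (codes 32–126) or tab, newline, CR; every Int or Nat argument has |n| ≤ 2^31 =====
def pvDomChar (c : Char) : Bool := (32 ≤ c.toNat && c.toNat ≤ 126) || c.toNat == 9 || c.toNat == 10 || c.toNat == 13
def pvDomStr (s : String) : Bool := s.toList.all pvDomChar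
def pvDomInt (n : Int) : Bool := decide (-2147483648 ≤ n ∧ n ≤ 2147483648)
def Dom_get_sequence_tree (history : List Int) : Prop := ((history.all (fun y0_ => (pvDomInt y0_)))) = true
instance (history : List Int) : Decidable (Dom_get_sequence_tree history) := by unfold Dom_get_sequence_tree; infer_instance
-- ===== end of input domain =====

-- B rewrites A's while-loop-with-accumulator as a top-down recursion on the difference
-- structure (objective: simpler); return values agree everywhere, both are total.

-- ===== PORT A =====
-- the comprehension [cur[i] - cur[i-1] for i in range(1, len(cur))]
def pvDiffA (cur : List Int) : List Int :=
  (PySem.List.pyRange 1 (cur.length : Int) 1).map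
    (fun i => PySem.List.pyGetD cur i 0 - PySem.List.pyGetD cur (i - 1) 0)

theorem pvDiffA_length_lt (cur : List Int)
    (h : cur.any (fun x => x != 0) = true) : (pvDiffA cur).length < cur.length := by
  cases cur with
  | nil => simp at h
  | cons a t =>
    simp only [pvDiffA, List.length_map, PySem.List.length_pyRange_one, List.length_cons]
    omega

-- the while loop, with `sequences` as accumulator
def pvGoA (cur : List Int) (sequences : List (List Int)) : List (List Int) :=
  if h : cur.any (fun x => x != 0) = true then
    pvGoA (pvDiffA cur) (sequences ++ [pvDiffA cur])
  else sequences
termination_by cur.length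
decreasing_by exact pvDiffA_length_lt cur h

def get_sequence_tree (history : List Int) : List (List Int) :=
  pvGoA history [history]

-- ===== PORT B =====
def pvDiffB (history : List Int) : List Int :=
  (PySem.List.pyRange 1 (history.length : Int) 1).map
    (fun i => PySem.List.pyGetD history i 0 - PySem.List.pyGetD history (i - 1) 0)

theorem pvDiffB_length_lt (history : List Int)
    (h : ¬ history.all (fun x => x == 0) = true) : (pvDiffB history).length < history.length := by
  cases history with
  | nil => simp at h
  | cons a t =>
    simp only [pvDiffB, List.length_map, PySem.List.length_pyRange_one, List.length_cons]
    omega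

def get_sequence_tree_alt (history : List Int) : List (List Int) :=
  if h : history.all (fun x => x == 0) = true then [history]
  else history :: get_sequence_tree_alt (pvDiffB history)
termination_by history.length
decreasing_by exact pvDiffB_length_lt history h

-- ===== PRECONDITION & SPEC =====
def Spec_get_sequence_tree (history : List Int) (out : List (List Int)) : Prop := out = get_sequence_tree_alt history
instance (history : List Int) (out : List (List Int)) : Decidable (Spec_get_sequence_tree history out) := by unfold Spec_get_sequence_tree; infer_instance

-- ===== CLAIM (what is proved, stated in full; the proofs are below) =====
def Claim_equal_get_sequence_tree : Prop := ∀ (history : List Int), Dom_get_sequence_tree history → Spec_get_sequence_tree history (get_sequence_tree history)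

-- ===== LEMMAS AND PROOFS =====
theorem pvDiff_eq (cur : List Int) : pvDiffA cur = pvDiffB cur := rfl

-- B's tree always starts with its argument
theorem alt_head (h : List Int) :
    get_sequence_tree_alt h = h :: (get_sequence_tree_alt h).tail := by
  unfold get_sequence_tree_alt
  split <;> simp

-- the loop invariant: running the loop from `cur` appends the tail of B's tree of `cur`
theorem pvGoA_eq (cur : List Int) (acc : List (List Int)) :
    pvGoA cur acc = acc ++ (get_sequence_tree_alt cur).tail := by
  induction cur, acc using pvGoA.induct with
  | case1 cur acc hany ih =>
    have hall : ¬ cur.all (fun x => x == 0) = true := by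
      simp only [List.any_eq_true, bne_iff_ne] at hany
      simp only [List.all_eq_true, beq_iff_eq]
      obtain ⟨x, hx, hne⟩ := hany
      exact fun hz => hne (hz x hx)
    rw [pvGoA]
    simp only [hany, dite_true]
    rw [ih]
    conv_rhs => rw [get_sequence_tree_alt]
    simp only [hall, pvDiff_eq]
    rw [alt_head (pvDiffB cur)]
    simp
  | case2 cur acc hany =>
    have hall : cur.all (fun x => x == 0) = true := by
      simp only [List.any_eq_true, bne_iff_ne, not_exists, not_and, not_not] at hany
      simp only [List.all_eq_true, beq_iff_eq]
      exact hany
    rw [pvGoA]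
    simp only [hany]
    rw [get_sequence_tree_alt]
    simp [hall]

-- ===== VERDICT (by name: the statement is the Claim_ definition above) =====
theorem get_sequence_tree_spec : Claim_equal_get_sequence_tree := by
  intro history _
  unfold Spec_get_sequence_tree get_sequence_tree
  rw [pvGoA_eq]
  rw [alt_head history]
  simp
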